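-- pv_equiv track=rewrite | github.com/hokoro/Algorithm | 구현/goldward.py | solution
-- ===== SOURCE A (Python) =====
-- def solution(k, score):
--     answer = []
--     golden_award = []
--
--     for s in score:
--         if len(golden_award) < k:
--             golden_award.append(s)
--         else:
--             if s > min(golden_award):
--                 golden_award.remove(min(golden_award))
--                 golden_award.append(s)
--         answer.append(min(golden_award))
--     return answer
-- ===== SOURCE B (Python) =====
-- def _insert(ga, x):
--     # in-place insert of x into ascending-sorted ga, after any equal elements (bisect_right by hand)
--     lo, hi = 0, len(ga)
--     while lo < hi:
--         mid = (lo + hi) // 2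
--         if ga[mid] <= x:
--             lo = mid + 1
--         else:
--             hi = mid
--     ga.insert(lo, x)
--
--
-- def solution(k, score):
--     answer = []
--     ga = []  # the current top-k scores, kept sorted ascending: ga[0] is the cutoff
--     for s in score:
--         if len(ga) < k:
--             _insert(ga, s)
--         elif s > ga[0]:
--             ga.pop(0)
--             _insert(ga, s)
--         answer.append(ga[0])
--     return answer
-- ===== Notes on version B (the rewrite author's own statement) =====
-- stated objective: faster
-- what changed: B keeps the top-k pool as an ascending sorted list, so the per-step cutoff is the list head in O(1) and the two min() scans plus list.remove disappear, replaced by one sorted insertion; Pre_ excludes k <= 0 with a nonempty score, where A raises ValueError (min of empty list) and B raises IndexError (ga[0] on empty list).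
import Mathlib
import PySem

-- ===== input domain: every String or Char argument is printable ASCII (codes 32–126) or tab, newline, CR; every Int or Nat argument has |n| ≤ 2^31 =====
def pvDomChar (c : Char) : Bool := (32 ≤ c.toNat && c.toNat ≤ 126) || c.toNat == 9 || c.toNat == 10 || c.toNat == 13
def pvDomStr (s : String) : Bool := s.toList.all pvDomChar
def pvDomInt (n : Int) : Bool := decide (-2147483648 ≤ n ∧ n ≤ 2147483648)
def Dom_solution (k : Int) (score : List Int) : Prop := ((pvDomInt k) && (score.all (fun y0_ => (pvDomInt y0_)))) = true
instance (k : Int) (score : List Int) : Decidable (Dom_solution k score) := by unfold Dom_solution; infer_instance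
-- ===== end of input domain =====

-- B keeps the top-k pool as an ascending sorted list (binary-search insertion), so the cutoff is its head and A's min() scans disappear; return-value equivalence only (A mutates no argument, B mutates only its own local list).

-- ===== PORT A =====
-- literal port of A's loop; the state is (answer, golden_award), `none` = the Python raised (min of empty list, k ≤ 0)
def solGoA (k : Int) : List Int → List Int → List Int → Option (List Int)
  | [], answer, _ => some answer
  | s :: rest, answer, ga =>
    if (ga.length : Int) < k then
      let ga' := ga ++ [s]
      match PySem.List.min? ga' (fun x => x) with
      | none => none
      | some m => solGoA k rest (answer ++ [m]) ga'
    else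
      match PySem.List.min? ga (fun x => x) with
      | none => none
      | some m =>
        if s > m then
          match PySem.List.remove? ga m with
          | none => none
          | some ga2 =>
            let ga' := ga2 ++ [s]
            match PySem.List.min? ga' (fun x => x) with
            | none => none
            | some m2 => solGoA k rest (answer ++ [m2]) ga'
        else
          match PySem.List.min? ga (fun x => x) with
          | none => none
          | some m2 => solGoA k rest (answer ++ [m2]) ga

def solution (k : Int) (score : List Int) : List Int :=
  (solGoA k score [] []).getD []

-- ===== PORT B =====
-- port of Source B's _insert binary search: the while-loop on (lo, hi); ga[mid] is exact via getD
-- because every call keeps 0 ≤ mid < hi ≤ len ga (the default is never read)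
-- structural recursion on the fuel hi - lo, which bounds the number of halving steps
def bisectGo (xs : List Int) (x : Int) : Nat → Nat → Nat → Nat
  | 0, lo, _ => lo
  | fuel + 1, lo, hi =>
    if lo < hi then
      let mid := (lo + hi) / 2
      if xs.getD mid 0 ≤ x then bisectGo xs x fuel (mid + 1) hi
      else bisectGo xs x fuel lo mid
    else lo

def bisectRight (xs : List Int) (x : Int) (lo hi : Nat) : Nat :=
  bisectGo xs x (hi - lo) lo hi

-- ga.insert(lo, x) of Source B's _insert
def insPos (ga : List Int) (x : Int) : List Int :=
  PySem.List.insert ga ((bisectRight ga x 0 ga.length : Nat) : Int) x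

-- literal port of B's loop; `none` = the Python raised (ga[0] on empty list, k ≤ 0)
def solGoB (k : Int) : List Int → List Int → List Int → Option (List Int)
  | [], answer, _ => some answer
  | s :: rest, answer, ga =>
    let ga? : Option (List Int) :=
      if (ga.length : Int) < k then some (insPos ga s)
      else
        match PySem.List.pyGet? ga 0 with
        | none => none
        | some h0 =>
          if s > h0 then
            match PySem.List.pop? ga 0 with
            | none => none
            | some p => some (insPos p.2 s)
          else some ga
    match ga? with
    | none => none
    | some ga' =>
      match PySem.List.pyGet? ga' 0 with
      | none => none
      | some h => solGoB k rest (answer ++ [h]) ga'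

def solution_alt (k : Int) (score : List Int) : List Int :=
  (solGoB k score [] []).getD []

-- ===== PRECONDITION & SPEC =====
-- Pre_ excludes k ≤ 0 with a nonempty score: there A raises ValueError (min of an empty list) and B raises IndexError (ga[0] on the empty pool).
def Pre_solution (k : Int) (score : List Int) : Prop := 1 ≤ k ∨ score = []
instance (k : Int) (score : List Int) : Decidable (Pre_solution k score) := by unfold Pre_solution; infer_instance
def pvWitness_solution : Int × List Int := (2, [10, 100, 20, 150, 1, 100, 200])

def Spec_solution (k : Int) (score : List Int) (out : List Int) : Prop := out = solution_alt k score
instance (k : Int) (score : List Int) (out : List Int) : Decidable (Spec_solution k score out) := by unfold Spec_solution; infer_instance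

-- ===== CLAIM (what is proved, stated in full; the proofs are below) =====
def Claim_equal_solution : Prop := ∀ (k : Int) (score : List Int), Dom_solution k score → Pre_solution k score → Spec_solution k score (solution k score)

-- ===== LEMMAS AND PROOFS =====

-- the binary search returns a position p with lo ≤ p ≤ hi, everything below p is ≤ x, everything from p on is > x
theorem bisectGo_spec (xs : List Int) (x : Int) (fuel : Nat) :
    ∀ (lo hi : Nat), hi - lo ≤ fuel →
    (∀ i j : Nat, i ≤ j → j < xs.length → xs.getD i 0 ≤ xs.getD j 0) →
    hi ≤ xs.length → lo ≤ hi →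
    (∀ j, j < lo → xs.getD j 0 ≤ x) →
    (∀ j, hi ≤ j → j < xs.length → x < xs.getD j 0) →
    lo ≤ bisectGo xs x fuel lo hi ∧ bisectGo xs x fuel lo hi ≤ hi ∧
    (∀ j, j < bisectGo xs x fuel lo hi → xs.getD j 0 ≤ x) ∧
    (∀ j, bisectGo xs x fuel lo hi ≤ j → j < xs.length → x < xs.getD j 0) := by
  induction fuel with
  | zero =>
    intro lo hi hfuel hsort hhi hlohi hlo_inv hhi_inv
    have : lo = hi := by omega
    subst this
    exact ⟨le_refl _, le_refl _, hlo_inv, hhi_inv⟩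
  | succ fuel ih =>
    intro lo hi hfuel hsort hhi hlohi hlo_inv hhi_inv
    rw [bisectGo]
    by_cases h : lo < hi
    · simp only [if_pos h]
      by_cases hc : xs.getD ((lo + hi) / 2) 0 ≤ x
      · simp only [if_pos hc]
        have hrec := ih ((lo + hi) / 2 + 1) hi (by omega) hsort hhi (by omega)
          (fun j hj => by
            by_cases hjlo : j < lo
            · exact hlo_inv j hjlo
            · exact le_trans (hsort j ((lo + hi) / 2) (by omega) (by omega)) hc)
          hhi_inv
        exact ⟨by omega, hrec.2.1, hrec.2.2.1, hrec.2.2.2⟩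
      · simp only [if_neg hc]
        have hrec := ih lo ((lo + hi) / 2) (by omega) hsort (by omega) (by omega)
          hlo_inv
          (fun j hj hjlen => lt_of_lt_of_le (lt_of_not_ge hc) (hsort ((lo + hi) / 2) j hj hjlen))
        exact ⟨hrec.1, by omega, hrec.2.2.1, hrec.2.2.2⟩
    · simp only [if_neg h]
      have : lo = hi := by omega
      subst this
      exact ⟨le_refl _, le_refl _, hlo_inv, hhi_inv⟩

theorem bisect_spec (xs : List Int) (x : Int) (lo hi : Nat)
    (hsort : ∀ i j : Nat, i ≤ j → j < xs.length → xs.getD i 0 ≤ xs.getD j 0)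
    (hhi : hi ≤ xs.length) (hlohi : lo ≤ hi)
    (hlo_inv : ∀ j, j < lo → xs.getD j 0 ≤ x)
    (hhi_inv : ∀ j, hi ≤ j → j < xs.length → x < xs.getD j 0) :
    lo ≤ bisectRight xs x lo hi ∧ bisectRight xs x lo hi ≤ hi ∧
    (∀ j, j < bisectRight xs x lo hi → xs.getD j 0 ≤ x) ∧
    (∀ j, bisectRight xs x lo hi ≤ j → j < xs.length → x < xs.getD j 0) :=
  bisectGo_spec xs x (hi - lo) lo hi (le_refl _) hsort hhi hlohi hlo_inv hhi_inv

theorem insPos_perm (ga : List Int) (x : Int) (hb : bisectRight ga x 0 ga.length ≤ ga.length) :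
    (insPos ga x).Perm (x :: ga) := by
  unfold insPos
  rw [PySem.List.insert_natCast ga (bisectRight ga x 0 ga.length) x hb]
  have hmid := List.perm_middle (a := x) (l₁ := ga.take (bisectRight ga x 0 ga.length))
    (l₂ := ga.drop (bisectRight ga x 0 ga.length))
  rwa [List.take_append_drop] at hmid

theorem pairwise_getD (xs : List Int) (h : xs.Pairwise (· ≤ ·)) :
    ∀ i j : Nat, i ≤ j → j < xs.length → xs.getD i 0 ≤ xs.getD j 0 := by
  intro i j hij hj
  rcases Nat.eq_or_lt_of_le hij with rfl | hlt
  · exact le_refl _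
  · rw [List.getD_eq_getElem xs 0 (by omega), List.getD_eq_getElem xs 0 hj]
    exact List.pairwise_iff_getElem.mp h i j (by omega) hj hlt

theorem insPos_sorted (ga : List Int) (x : Int) (h : ga.Pairwise (· ≤ ·)) :
    (insPos ga x).Pairwise (· ≤ ·) := by
  have hspec := bisect_spec ga x 0 ga.length (pairwise_getD ga h) (le_refl _) (by omega)
    (by omega) (by omega)
  obtain ⟨-, hle, hlow, hhigh⟩ := hspec
  unfold insPos
  rw [PySem.List.insert_natCast ga (bisectRight ga x 0 ga.length) x hle]
  set p := bisectRight ga x 0 ga.length with hp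
  have hmem_take : ∀ a ∈ ga.take p, a ≤ x := by
    intro a ha
    obtain ⟨i, hi, rfl⟩ := List.mem_iff_getElem.mp ha
    have hi' : i < p ∧ i < ga.length := by
      simp only [List.length_take] at hi; omega
    rw [List.getElem_take]
    have hval := hlow i hi'.1
    rwa [List.getD_eq_getElem ga 0 hi'.2] at hval
  have hmem_drop : ∀ b ∈ ga.drop p, x < b := by
    intro b hb
    obtain ⟨i, hi, rfl⟩ := List.mem_iff_getElem.mp hb
    rw [List.getElem_drop]
    have hlen : p + i < ga.length := by
      simp only [List.length_drop] at hi; omega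
    have hval := hhigh (p + i) (by omega) hlen
    rwa [List.getD_eq_getElem ga 0 hlen] at hval
  refine List.pairwise_append.mpr ⟨h.sublist (List.take_sublist _ _), ?_, ?_⟩
  · refine List.pairwise_cons.mpr ⟨fun b hb => le_of_lt (hmem_drop b hb), ?_⟩
    exact h.sublist (List.drop_sublist _ _)
  · intro a ha b hb
    rcases List.mem_cons.mp hb with rfl | hb
    · exact hmem_take a ha
    · exact le_trans (hmem_take a ha) (le_of_lt (hmem_drop b hb))

-- min(gaA) is the head of any sorted permutation of gaA
theorem min?_eq_head (gaA : List Int) (h : Int) (t : List Int)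
    (hperm : (h :: t).Perm gaA) (hsort : List.Pairwise (· ≤ ·) (h :: t)) :
    PySem.List.min? gaA (fun x => x) = some h := by
  have hne : gaA ≠ [] := by
    intro he; subst he; exact absurd hperm.length_eq (by simp)
  obtain ⟨m, hm⟩ : ∃ m, PySem.List.min? gaA (fun x => x) = some m := by
    cases hmm : PySem.List.min? gaA (fun x => x) with
    | none => exact absurd ((PySem.List.min?_eq_none_iff _ _).mp hmm) hne
    | some m => exact ⟨m, rfl⟩
  have hmem : m ∈ gaA := PySem.List.min?_mem hm
  have hmin : ∀ y ∈ gaA, m ≤ y := fun y hy => PySem.List.min?_isMin hm y hy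
  have hm_ht : m ∈ h :: t := hperm.mem_iff.mpr hmem
  have hhm : h ≤ m := by
    rcases hm_ht with _ | hmt
    · exact le_refl _
    · exact (List.pairwise_cons.mp hsort).1 m (by assumption)
  have hmh : m ≤ h := hmin h (hperm.mem_iff.mp (by simp))
  rw [hm]
  congr 1
  omega

-- main loop invariant: both loops agree whenever B's pool is a sorted permutation of A's
theorem go_eq (k : Int) (hk : 1 ≤ k) :
    ∀ (rest ans gaA gaB : List Int), gaB.Perm gaA → gaB.Pairwise (· ≤ ·) →
      solGoA k rest ans gaA = solGoB k rest ans gaB := by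
  intro rest
  induction rest with
  | nil => intro ans gaA gaB _ _; rfl
  | cons s rest ih =>
    intro ans gaA gaB hperm hsort
    have hlen : gaB.length = gaA.length := hperm.length_eq
    by_cases hfill : (gaA.length : Int) < k
    · -- append branch on both sides
      have hfillB : (gaB.length : Int) < k := by rw [hlen]; exact hfill
      have hperm' : (insPos gaB s).Perm (gaA ++ [s]) := by
        refine (insPos_perm gaB s (bisect_spec gaB s 0 gaB.length (pairwise_getD gaB hsort)
          (le_refl _) (by omega) (by omega) (by omega)).2.1).trans ?_
        exact (hperm.cons s).trans (List.perm_append_singleton s gaA).symm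
      have hsort' := insPos_sorted gaB s hsort
      obtain ⟨h, t, hins⟩ : ∃ h t, insPos gaB s = h :: t := by
        cases hins : insPos gaB s with
        | nil => exact absurd (hins ▸ hperm').length_eq (by simp)
        | cons a b => exact ⟨a, b, rfl⟩
      have hmin : PySem.List.min? (gaA ++ [s]) (fun x => x) = some h :=
        min?_eq_head _ h t (hins ▸ hperm') (hins ▸ hsort')
      simp only [solGoA, solGoB, hfill, hfillB, reduceIte, hmin, hins,
        PySem.List.pyGet?_zero_cons]
      exact ih (ans ++ [h]) (gaA ++ [s]) (h :: t) (hins ▸ hperm') (hins ▸ hsort')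
    · -- pool full: gaA nonempty since k ≥ 1
      have hfillB : ¬ (gaB.length : Int) < k := by rw [hlen]; exact hfill
      obtain ⟨h0, t, hB⟩ : ∃ h0 t, gaB = h0 :: t := by
        cases hB : gaB with
        | nil => exfalso; rw [hB] at hlen; simp at hlen; omega
        | cons a b => exact ⟨a, b, rfl⟩
      subst hB
      have hmin : PySem.List.min? gaA (fun x => x) = some h0 :=
        min?_eq_head gaA h0 t hperm hsort
      by_cases hgt : s > h0
      · -- replace the minimum
        have hmem : h0 ∈ gaA := hperm.mem_iff.mp (by simp)
        have hrem : PySem.List.remove? gaA h0 = some (gaA.erase h0) :=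
          PySem.List.remove?_eq_some_erase gaA h0 hmem
        have herase : ((h0 :: t).erase h0) = t := by simp
        have hpermE : t.Perm (gaA.erase h0) := herase ▸ (hperm.erase h0)
        have hsortT : t.Pairwise (· ≤ ·) := (List.pairwise_cons.mp hsort).2
        have hperm' : (insPos t s).Perm (gaA.erase h0 ++ [s]) := by
          refine (insPos_perm t s (bisect_spec t s 0 t.length (pairwise_getD t hsortT)
            (le_refl _) (by omega) (by omega) (by omega)).2.1).trans ?_
          exact (hpermE.cons s).trans (by simpa using (List.perm_append_singleton s (gaA.erase h0)).symm)
        have hsort' := insPos_sorted t s hsortT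
        obtain ⟨h, t', hins⟩ : ∃ h t', insPos t s = h :: t' := by
          cases hins : insPos t s with
          | nil => exact absurd (hins ▸ hperm').length_eq (by simp)
          | cons a b => exact ⟨a, b, rfl⟩
        have hmin' : PySem.List.min? (gaA.erase h0 ++ [s]) (fun x => x) = some h :=
          min?_eq_head _ h t' (hins ▸ hperm') (hins ▸ hsort')
        simp only [solGoA, solGoB, hfill, hfillB, reduceIte, hmin, hgt, hrem, hmin',
          PySem.List.pyGet?_zero_cons, PySem.List.pop?_zero_cons, hins]
        exact ih (ans ++ [h]) (gaA.erase h0 ++ [s]) (h :: t') (hins ▸ hperm') (hins ▸ hsort')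
      · -- keep the pool
        simp only [solGoA, solGoB, hfill, hfillB, reduceIte, hmin, hgt,
          PySem.List.pyGet?_zero_cons]
        exact ih (ans ++ [h0]) gaA (h0 :: t) hperm hsort

-- ===== VERDICT (by name: the statement is the Claim_ definition above) =====
theorem solution_spec : Claim_equal_solution := by
  intro k score _ hpre
  unfold Spec_solution solution solution_alt
  rcases hpre with hk | rfl
  · rw [go_eq k hk score [] [] [] (List.Perm.refl _) (by simp)]
  · rfl
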